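-- pv_equiv track=rewrite | github.com/kistanovdev/adventofcode2023 | day3/solution_pt2.py | extract_number_coordinates
-- ===== SOURCE A (Python) =====
-- def extract_number_coordinates(row_idx, line):
--     buff = []
--     res = []
--     for idx, item in enumerate(line):
--         if item.isdigit():
--             buff.append((row_idx, idx))
--         else:
--             if buff:
--                 res.append(buff)
--                 buff = []
--     if buff:
--         res.append(buff)
--
--     return tuple(sorted(res))
-- ===== SOURCE B (Python) =====
-- def extract_number_coordinates(row_idx, line):
--     d = [ch.isdigit() for ch in line]
--     starts = [i for i, (p, c) in enumerate(zip([False] + d, d)) if c and not p]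
--     ends = [i for i, (c, nx) in enumerate(zip(d, d[1:] + [False])) if c and not nx]
--     res = [[(row_idx, j) for j in range(s, e + 1)] for s, e in zip(starts, ends)]
--     return tuple(sorted(res))
-- ===== Notes on version B (the rewrite author's own statement) =====
-- stated objective: alternative
-- what changed: Replaces A's single-pass buffer/flush state machine by staged boundary detection: compute run starts (digit whose predecessor is not) and run ends (digit whose successor is not) via shifted zips, then zip starts with ends and materialise each [start,end] interval with range.
import Mathlib
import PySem

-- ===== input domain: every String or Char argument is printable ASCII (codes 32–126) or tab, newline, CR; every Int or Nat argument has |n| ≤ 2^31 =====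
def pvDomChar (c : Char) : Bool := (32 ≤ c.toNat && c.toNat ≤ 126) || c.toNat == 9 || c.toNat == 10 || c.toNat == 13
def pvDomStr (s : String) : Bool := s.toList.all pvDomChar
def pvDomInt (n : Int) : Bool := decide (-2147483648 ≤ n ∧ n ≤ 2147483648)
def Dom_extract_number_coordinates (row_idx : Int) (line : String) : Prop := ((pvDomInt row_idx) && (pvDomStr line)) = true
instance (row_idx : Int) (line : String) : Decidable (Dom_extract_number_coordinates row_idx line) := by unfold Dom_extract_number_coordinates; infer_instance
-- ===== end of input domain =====

-- B replaces A's buffer/flush state machine by staged boundary detection (run starts and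
-- run ends found via shifted zips, zipped together, each interval materialised by range).

-- Shared helper for the final `tuple(sorted(res))` of BOTH Pythons: PySem.List.sorted needs a
-- DecidableLT key, which List (Int × Int) lacks, so Python's lexicographic comparison on
-- lists of int-pairs is ported by hand (exact for int tuples/lists), and the stable
-- insertion sort is PySem.List.insertBy folded left (= PySem.List.sorted's own definition).
def pvPairLt (a b : Int × Int) : Bool := a.1 < b.1 || (a.1 == b.1 && a.2 < b.2)

def pvListLt : List (Int × Int) → List (Int × Int) → Bool
  | [], [] => false
  | [], _ :: _ => true
  | _ :: _, [] => false
  | a :: as, b :: bs => pvPairLt a b || (a == b && pvListLt as bs)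

def pvSortLists (xs : List (List (Int × Int))) : List (List (Int × Int)) :=
  xs.foldl (fun acc x => PySem.List.insertBy pvListLt x acc) []

-- ===== PORT A =====
-- the for-loop of A: state (buff, res), processed over enumerate(line)
def pvALoop (row_idx : Int) (buff : List (Int × Int)) (res : List (List (Int × Int))) :
    List (Int × Char) → List (Int × Int) × List (List (Int × Int))
  | [] => (buff, res)
  | (idx, item) :: rest =>
    if PySem.Chars.isdigit item then
      pvALoop row_idx (buff ++ [(row_idx, idx)]) res rest
    else
      if buff ≠ [] then pvALoop row_idx [] (res ++ [buff]) rest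
      else pvALoop row_idx buff res rest

def extract_number_coordinates (row_idx : Int) (line : String) : List (List (Int × Int)) :=
  let st := pvALoop row_idx [] [] (PySem.List.enumerate line.toList)
  let res := if st.1 ≠ [] then st.2 ++ [st.1] else st.2
  pvSortLists res

-- ===== PORT B =====
def extract_number_coordinates_alt (row_idx : Int) (line : String) : List (List (Int × Int)) :=
  let d := line.toList.map PySem.Chars.isdigit
  let starts := (PySem.List.enumerate (List.zip (false :: d) d)).filterMap
      (fun p => if p.2.2 && !p.2.1 then some p.1 else none)
  let ends := (PySem.List.enumerate (List.zip d (d.drop 1 ++ [false]))).filterMap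
      (fun p => if p.2.1 && !p.2.2 then some p.1 else none)
  pvSortLists ((starts.zip ends).map fun se =>
      (PySem.List.pyRange se.1 (se.2 + 1) 1).map (fun j => (row_idx, j)))

-- ===== PRECONDITION & SPEC =====
def Spec_extract_number_coordinates (row_idx : Int) (line : String) (out : List (List (Int × Int))) : Prop := out = extract_number_coordinates_alt row_idx line
instance (row_idx : Int) (line : String) (out : List (List (Int × Int))) : Decidable (Spec_extract_number_coordinates row_idx line out) := by unfold Spec_extract_number_coordinates; infer_instance

-- ===== CLAIM (what is proved, stated in full; the proofs are below) =====
def Claim_equal_extract_number_coordinates : Prop := ∀ (row_idx : Int) (line : String), Dom_extract_number_coordinates row_idx line → Spec_extract_number_coordinates row_idx line (extract_number_coordinates row_idx line)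

-- ===== LEMMAS AND PROOFS =====

-- recursive form of B's starts: flag of a digit list with 'previous char was a digit' state p
def pvS (p : Bool) (i : Int) : List Bool → List Int
  | [] => []
  | b :: bs => (if b && !p then [i] else []) ++ pvS b (i + 1) bs

-- recursive form of B's ends (look-ahead at the next flag)
def pvE (i : Int) : List Bool → List Int
  | [] => []
  | b :: bs => (if b && !(bs.headD false) then [i] else []) ++ pvE (i + 1) bs

-- ends including a possible end at i-1 owed to an ongoing run (state p = 'char i-1 is a digit')
def pvEE (p : Bool) (i : Int) : List Bool → List Int
  | [] => if p then [i - 1] else []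
  | b :: bs => (if p && !b then [i - 1] else []) ++ pvEE b (i + 1) bs

lemma pvEE_eq (p : Bool) (i : Int) (bs : List Bool) :
    pvEE p i bs = (if p && !(bs.headD false) then [i - 1] else []) ++ pvE i bs := by
  induction bs generalizing p i with
  | nil => cases p <;> simp [pvEE, pvE]
  | cons b bs' ih => simp [pvEE, pvE, ih b (i + 1)]

lemma pvStarts_eq (d : List Bool) : ∀ (p : Bool) (i : Int),
    (PySem.List.enumerate (List.zip (p :: d) d) i).filterMap
      (fun q => if q.2.2 && !q.2.1 then some q.1 else none) = pvS p i d := by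
  induction d with
  | nil => intro p i; simp [pvS, PySem.List.enumerate_nil]
  | cons b d' ih =>
    intro p i
    simp only [List.zip_cons_cons, PySem.List.enumerate_cons, List.filterMap_cons]
    rw [ih b (i + 1)]
    by_cases h : b && !p <;> simp [pvS, h]

lemma pvEnds_eq (d : List Bool) : ∀ (i : Int),
    (PySem.List.enumerate (List.zip d (d.drop 1 ++ [false])) i).filterMap
      (fun q => if q.2.1 && !q.2.2 then some q.1 else none) = pvE i d := by
  induction d with
  | nil => intro i; simp [pvE, PySem.List.enumerate_nil]
  | cons b d' ih =>
    intro i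
    cases d' with
    | nil =>
      by_cases h : b <;>
        simp [pvE, h, PySem.List.enumerate_cons, PySem.List.enumerate_nil]
    | cons b' d'' =>
      have hih := ih (i + 1)
      simp only [List.drop_succ_cons, List.drop_zero] at hih ⊢
      simp only [List.cons_append, List.zip_cons_cons, PySem.List.enumerate_cons,
        List.filterMap_cons]
      rw [hih]
      by_cases h : b && !b' <;> simp [pvE, h]

-- the interval list B builds from one (start, end) pair
def pvIval (row : Int) (se : Int × Int) : List (Int × Int) :=
  (PySem.List.pyRange se.1 (se.2 + 1) 1).map (fun j => (row, j))

-- a buffer holding the ongoing run [s, i)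
def pvBuf (row s i : Int) : List (Int × Int) :=
  (PySem.List.pyRange s i 1).map (fun j => (row, j))

-- main invariant: A's loop with empty buffer (resp. ongoing-run buffer) computes the
-- intervals of the zipped boundary lists
lemma pvMain (row : Int) (cs : List Char) :
    (∀ (i : Int) (res : List (List (Int × Int))),
      (let st := pvALoop row [] res (PySem.List.enumerate cs i);
       if st.1 ≠ [] then st.2 ++ [st.1] else st.2) =
      res ++ (List.zip (pvS false i (cs.map PySem.Chars.isdigit))
                       (pvEE false i (cs.map PySem.Chars.isdigit))).map (pvIval row))
    ∧
    (∀ (i s : Int) (res : List (List (Int × Int))), s < i →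
      (let st := pvALoop row (pvBuf row s i) res (PySem.List.enumerate cs i);
       if st.1 ≠ [] then st.2 ++ [st.1] else st.2) =
      res ++ (List.zip (s :: pvS true i (cs.map PySem.Chars.isdigit))
                       (pvEE true i (cs.map PySem.Chars.isdigit))).map (pvIval row)) := by
  induction cs with
  | nil =>
    constructor
    · intro i res
      simp [pvALoop, PySem.List.enumerate_nil, pvS, pvEE]
    · intro i s res hsi
      have hne : pvBuf row s i ≠ [] := by
        simp [pvBuf, PySem.List.pyRange_one_cons hsi]
      simp only [pvALoop, PySem.List.enumerate_nil, List.map_nil, pvS, pvEE]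
      simp only [hne, ne_eq, not_false_eq_true, if_pos]
      have : pvIval row (s, i - 1) = pvBuf row s i := by
        simp [pvIval, pvBuf]
      simp [this]
  | cons c cs' ih =>
    constructor
    · intro i res
      simp only [PySem.List.enumerate_cons, pvALoop, List.map_cons]
      by_cases hd : PySem.Chars.isdigit c
      · -- first digit of a new run: buffer becomes [(row, i)] = pvBuf row i (i+1)
        have hb : ([] : List (Int × Int)) ++ [(row, i)] = pvBuf row i (i + 1) := by
          simp [pvBuf, PySem.List.pyRange_one_singleton]
        rw [if_pos hd, hb, ih.2 (i + 1) i res (by omega)]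
        simp [pvS, pvEE, hd]
      · rw [if_neg hd]
        simp only [ne_eq, not_true_eq_false, if_false]
        rw [ih.1 (i + 1) res]
        simp [pvS, pvEE, hd]
    · intro i s res hsi
      simp only [PySem.List.enumerate_cons, pvALoop, List.map_cons]
      by_cases hd : PySem.Chars.isdigit c
      · -- run continues: pvBuf row s i ++ [(row, i)] = pvBuf row s (i+1)
        have hb : pvBuf row s i ++ [(row, i)] = pvBuf row s (i + 1) := by
          simp [pvBuf, PySem.List.pyRange_one_succ_right (le_of_lt hsi)]
        rw [if_pos hd, hb, ih.2 (i + 1) s res (by omega)]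
        simp [pvS, pvEE, hd]
      · -- run ends at i-1: flush the buffer
        have hne : pvBuf row s i ≠ [] := by
          simp [pvBuf, PySem.List.pyRange_one_cons hsi]
        rw [if_neg hd, if_pos hne, ih.1 (i + 1) (res ++ [pvBuf row s i])]
        have : pvIval row (s, i - 1) = pvBuf row s i := by
          simp [pvIval, pvBuf]
        simp [pvS, pvEE, hd, this, List.append_assoc]

-- ===== VERDICT (by name: the statement is the Claim_ definition above) =====
theorem extract_number_coordinates_spec : Claim_equal_extract_number_coordinates := by
  intro row_idx line _
  unfold Spec_extract_number_coordinates extract_number_coordinates extract_number_coordinates_alt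
  simp only [pvStarts_eq, pvEnds_eq]
  have h := (pvMain row_idx line.toList).1 0 []
  simp only [List.nil_append] at h
  rw [h, pvEE_eq]
  simp only [Bool.false_and, Bool.false_eq_true, if_false, List.nil_append]
  rfl
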